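-- pv_equiv track=rewrite | github.com/fmatter/cariban_irregular_1 | workflow/lingpy_alignments.py | join_slots
-- ===== SOURCE A (Python) =====
-- def is_empty(slot):
--     if list(set(slot.split())) == ["-"]:
--         return True
--     else:
--         return False
--
-- def join_slots(slotlist, almsep):
--     out = [slotlist[0]]
--     for slot in slotlist[1::]:
--         if is_empty(out[-1]) or is_empty(slot):
--             out.append("-")
--         else:
--             out.append("+")
--         out.append(slot)
--     return " ".join(out)
-- ===== SOURCE B (Python) =====
-- def is_empty(slot):
--     if list(set(slot.split())) == ["-"]:
--         return True
--     else:
--         return False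
--
-- def join_slots(slotlist, almsep):
--     # Optimistic fix-up: assume every separator is "+", then demote to "-"
--     # every separator adjacent to an empty slot, in one marking pass.
--     seps = ["+"] * (len(slotlist) - 1)
--     for i, s in enumerate(slotlist):
--         if is_empty(s):
--             if i > 0:
--                 seps[i - 1] = "-"
--             if i < len(seps):
--                 seps[i] = "-"
--     parts = [slotlist[0]]
--     for sep, s in zip(seps, slotlist[1:]):
--         parts.append(sep)
--         parts.append(s)
--     return " ".join(parts)
-- ===== Notes on version B (the rewrite author's own statement) =====
-- stated objective: alternative
-- what changed: Replaces A's stateful left-to-right loop that re-derives the previous slot's emptiness from out[-1] with an optimistic fix-up algorithm: all separators start as '+', a marking pass demotes the separators adjacent to each empty slot to '-', and a final pass interleaves separators and slots.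
import Mathlib
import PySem

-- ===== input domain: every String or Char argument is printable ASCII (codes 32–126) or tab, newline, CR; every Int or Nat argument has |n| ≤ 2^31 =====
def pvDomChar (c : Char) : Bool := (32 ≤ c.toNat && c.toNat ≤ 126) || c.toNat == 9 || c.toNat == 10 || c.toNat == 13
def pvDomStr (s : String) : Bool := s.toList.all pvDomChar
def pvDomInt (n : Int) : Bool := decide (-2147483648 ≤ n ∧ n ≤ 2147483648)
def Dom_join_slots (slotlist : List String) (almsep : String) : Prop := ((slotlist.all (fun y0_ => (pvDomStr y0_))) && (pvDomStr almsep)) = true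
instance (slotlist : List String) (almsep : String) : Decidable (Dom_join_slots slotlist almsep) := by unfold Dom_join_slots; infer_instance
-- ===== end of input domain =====

-- B replaces A's stateful one-pass loop with an optimistic fix-up algorithm: all
-- separators start '+', a marking pass demotes those adjacent to empty slots to '-',
-- then separators and slots are interleaved (objective: alternative, same cost).

-- ===== PORT A =====
-- is_empty: list(set(slot.split())) == ["-"] — the comparison against a singleton list
-- does not depend on the set's iteration order, so the insertion-order Set is exact here.
def is_empty (slot : String) : Bool :=
  if PySem.Set.ofList (PySem.Str.split₀ slot) = ["-"] then true else false

def join_slots (slotlist : List String) (almsep : String) : String :=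
  -- slotlist[0]: pyGet? none = IndexError, excluded by Pre_
  let out := [(PySem.List.pyGet? slotlist 0).getD ""]
  let out := (PySem.List.slice slotlist (some 1) none).foldl (fun out slot =>
      let out := if is_empty ((PySem.List.pyGet? out (-1)).getD "") || is_empty slot
                 then out ++ ["-"] else out ++ ["+"]
      out ++ [slot]) out
  PySem.Str.join " " out

-- ===== PORT B =====
def join_slots_alt (slotlist : List String) (almsep : String) : String :=
  let seps := List.replicate (slotlist.length - 1) "+"
  let seps := (PySem.List.enumerate slotlist).foldl (fun seps p =>
      if is_empty p.2 then
        -- seps[i-1] = "-" / seps[i] = "-" are index assignments guarded to be in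
        -- range (0 < i, i < len(seps)), so List.set with .toNat is exact here
        let seps := if 0 < p.1 then seps.set (p.1 - 1).toNat "-" else seps
        if p.1 < (seps.length : Int) then seps.set p.1.toNat "-" else seps
      else seps) seps
  -- slotlist[0]: pyGet? none = IndexError, excluded by Pre_
  let parts := [(PySem.List.pyGet? slotlist 0).getD ""]
  let parts := (List.zip seps (PySem.List.slice slotlist (some 1) none)).foldl
      (fun parts q => (parts ++ [q.1]) ++ [q.2]) parts
  PySem.Str.join " " parts

-- ===== PRECONDITION & SPEC =====
-- Pre_ excludes only the empty slotlist, where Python A raises IndexError on slotlist[0].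
def Pre_join_slots (slotlist : List String) (almsep : String) : Prop := slotlist ≠ []
instance (slotlist : List String) (almsep : String) : Decidable (Pre_join_slots slotlist almsep) := by unfold Pre_join_slots; infer_instance
def pvWitness_join_slots : List String × String := (["a b", "- -", "c"], " ")

def Spec_join_slots (slotlist : List String) (almsep : String) (out : String) : Prop := out = join_slots_alt slotlist almsep
instance (slotlist : List String) (almsep : String) (out : String) : Decidable (Spec_join_slots slotlist almsep out) := by unfold Spec_join_slots; infer_instance

-- ===== CLAIM (what is proved, stated in full; the proofs are below) =====
def Claim_equal_join_slots : Prop := ∀ (slotlist : List String) (almsep : String), Dom_join_slots slotlist almsep → Pre_join_slots slotlist almsep → Spec_join_slots slotlist almsep (join_slots slotlist almsep)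

-- ===== LEMMAS AND PROOFS =====

-- the separator/slot chain A's loop produces after the first slot
def pvChain (p : String) : List String → List String
  | [] => []
  | s :: r => (if is_empty p || is_empty s then "-" else "+") :: s :: pvChain s r

-- the separator list between adjacent slots
def pvSeps : List String → List String
  | x :: y :: r => (if is_empty x || is_empty y then "-" else "+") :: pvSeps (y :: r)
  | _ => []

-- B's marking-loop body, named (the port's inline lambda is this function, by rfl)
def pvStep (seps : List String) (p : Int × String) : List String :=
  if is_empty p.2 then
    let seps := if 0 < p.1 then seps.set (p.1 - 1).toNat "-" else seps
    if p.1 < (seps.length : Int) then seps.set p.1.toNat "-" else seps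
  else seps

-- cell i of the separator array gets marked by the pass over t (slot indices from k)
def pvHit (t : List String) (k i : Nat) : Bool :=
  (decide (k ≤ i) && decide (i - k < t.length) && is_empty (t.getD (i - k) "")) ||
  (decide (k ≤ i + 1) && decide (i + 1 - k < t.length) && is_empty (t.getD (i + 1 - k) ""))

theorem pvHit_iff (t : List String) (k i : Nat) : pvHit t k i = true ↔
    ((k ≤ i ∧ i - k < t.length ∧ is_empty (t.getD (i - k) "") = true) ∨
     (k ≤ i + 1 ∧ i + 1 - k < t.length ∧ is_empty (t.getD (i + 1 - k) "") = true)) := by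
  simp [pvHit, and_assoc]

theorem pvGet_last (a : List String) (p : String) :
    PySem.List.pyGet? (a ++ [p]) (-1) = some p := by
  simp [PySem.List.pyGet?, PySem.List.pyIdx?]

theorem pvA_loop (rest : List String) : ∀ (a : List String) (p : String),
    rest.foldl (fun out slot =>
      (if is_empty ((PySem.List.pyGet? out (-1)).getD "") || is_empty slot
        then out ++ ["-"] else out ++ ["+"]) ++ [slot]) (a ++ [p])
    = (a ++ [p]) ++ pvChain p rest := by
  induction rest with
  | nil => intro a p; simp [pvChain]
  | cons s r ih =>
    intro a p
    simp only [List.foldl_cons, pvGet_last, Option.getD_some]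
    by_cases h : (is_empty p || is_empty s) = true
    · rw [if_pos h]
      have hih := ih (a ++ [p] ++ ["-"]) s
      simp only [List.append_assoc] at hih ⊢
      rw [hih]
      simp [pvChain, h]
    · rw [if_neg h]
      have hih := ih (a ++ [p] ++ ["+"]) s
      simp only [List.append_assoc] at hih ⊢
      rw [hih]
      rw [Bool.not_eq_true] at h
      simp [pvChain, h]

theorem pvSeps_length : ∀ (l : List String), (pvSeps l).length = l.length - 1 := by
  intro l
  induction l with
  | nil => simp [pvSeps]
  | cons x r ih =>
    cases r with
    | nil => simp [pvSeps]
    | cons y t => simp [pvSeps] at ih ⊢; omega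

theorem pvSeps_getD : ∀ (l : List String) (i : Nat), i + 1 < l.length →
    (pvSeps l).getD i "" =
      if is_empty (l.getD i "") || is_empty (l.getD (i+1) "") then "-" else "+" := by
  intro l
  induction l with
  | nil => intro i h; simp at h
  | cons x r ih =>
    intro i h
    cases r with
    | nil => simp at h
    | cons y t =>
      cases i with
      | zero => simp [pvSeps]
      | succ j =>
        have := ih j (by simpa using h)
        simpa [pvSeps] using this

theorem pvSetD_self (l : List String) (i : Nat) (a : String) (h : i < l.length) :
    (l.set i a).getD i "" = a := by
  rw [List.getD_eq_getElem?_getD, List.getElem?_set_self']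
  simp [h]

theorem pvSetD_ne (l : List String) (i j : Nat) (a : String) (h : i ≠ j) :
    (l.set i a).getD j "" = l.getD j "" := by
  rw [List.getD_eq_getElem?_getD, List.getElem?_set_ne h, ← List.getD_eq_getElem?_getD]

theorem pvStep_length (seps : List String) (p : Int × String) :
    (pvStep seps p).length = seps.length := by
  unfold pvStep
  dsimp only
  repeat' split
  all_goals simp

theorem pvStep_getD (seps : List String) (k : Nat) (s : String) (i : Nat) (hi : i < seps.length) :
    (pvStep seps ((k : Int), s)).getD i "" =
      if is_empty s = true ∧ (i + 1 = k ∨ i = k) then "-" else seps.getD i "" := by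
  unfold pvStep
  dsimp only
  by_cases hs : is_empty s = true
  · rw [if_pos hs]
    by_cases hk0 : (0 : Int) < (k : Int)
    · rw [if_pos hk0]
      have hk0' : 0 < k := by exact_mod_cast hk0
      have ht1 : (((k : Int)) - 1).toNat = k - 1 := by omega
      have hlen1 : (seps.set (k - 1) "-").length = seps.length := by simp
      rw [ht1]
      by_cases hk2 : (k : Int) < (((seps.set (k - 1) "-").length : Nat) : Int)
      · rw [if_pos hk2]
        have hk2' : k < seps.length := by rw [hlen1] at hk2; exact_mod_cast hk2
        have htn : ((k : Int)).toNat = k := by omega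
        rw [htn]
        by_cases he : i = k
        · subst he
          rw [pvSetD_self _ _ _ (by simpa using hk2'), if_pos ⟨hs, Or.inr rfl⟩]
        · rw [pvSetD_ne _ _ _ _ (by omega)]
          by_cases he2 : i + 1 = k
          · rw [show k - 1 = i from by omega, pvSetD_self _ _ _ (by omega), if_pos ⟨hs, Or.inl he2⟩]
          · rw [pvSetD_ne _ _ _ _ (by omega), if_neg (by tauto)]
      · rw [if_neg hk2]
        have hk2' : ¬ k < seps.length := by
          rw [hlen1] at hk2; exact_mod_cast hk2
        by_cases he2 : i + 1 = k
        · rw [show k - 1 = i from by omega, pvSetD_self _ _ _ (by omega), if_pos ⟨hs, Or.inl he2⟩]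
        · rw [pvSetD_ne _ _ _ _ (by omega), if_neg (by
            rintro ⟨_, h | h⟩
            · exact he2 h
            · omega)]
    · rw [if_neg hk0]
      have hk0' : k = 0 := by omega
      by_cases hk2 : (k : Int) < ((seps.length : Nat) : Int)
      · rw [if_pos hk2]
        have htn : ((k : Int)).toNat = k := by omega
        rw [htn]
        by_cases he : i = k
        · subst he
          rw [pvSetD_self _ _ _ hi, if_pos ⟨hs, Or.inr rfl⟩]
        · rw [pvSetD_ne _ _ _ _ (by omega), if_neg (by
            rintro ⟨_, h | h⟩
            · omega
            · exact he h)]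
      · rw [if_neg hk2]
        have : ¬ k < seps.length := by exact_mod_cast hk2
        rw [if_neg (by
          rintro ⟨_, h | h⟩ <;> omega)]
  · rw [if_neg hs, if_neg (fun h => hs h.1)]

theorem pvScatter (t : List String) : ∀ (k : Nat) (seps : List String),
    ((PySem.List.enumerate t (k : Int)).foldl pvStep seps).length = seps.length ∧
    ∀ i, i < seps.length →
      ((PySem.List.enumerate t (k : Int)).foldl pvStep seps).getD i "" =
        if pvHit t k i then "-" else seps.getD i "" := by
  induction t with
  | nil =>
    intro k seps
    refine ⟨rfl, fun i hi => ?_⟩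
    rw [if_neg]
    · rfl
    · rw [pvHit_iff]
      rintro (⟨_, h, _⟩ | ⟨_, h, _⟩) <;> simp at h
  | cons s t ih =>
    intro k seps
    rw [PySem.List.enumerate_cons, List.foldl_cons,
        show ((k : Int) + 1) = ((k + 1 : Nat) : Int) from by push_cast; ring]
    obtain ⟨ihlen, ihval⟩ := ih (k + 1) (pvStep seps ((k : Int), s))
    have hlen : (pvStep seps ((k : Int), s)).length = seps.length := pvStep_length _ _
    refine ⟨by rw [ihlen, hlen], fun i hi => ?_⟩
    rw [ihval i (by omega), pvStep_getD seps k s i hi]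
    have hshift : ∀ m : Nat, k + 1 ≤ m → (s :: t).getD (m - k) "" = t.getD (m - (k + 1)) "" := by
      intro m hm
      have hpos : m - k = (m - (k + 1)) + 1 := by omega
      rw [hpos]; rfl
    by_cases hc : pvHit (s :: t) k i = true
    · rw [if_pos hc]
      rw [pvHit_iff] at hc
      have key : pvHit t (k + 1) i = true ∨ (is_empty s = true ∧ (i + 1 = k ∨ i = k)) := by
        rcases hc with ⟨h1, h2, h3⟩ | ⟨h1, h2, h3⟩
        · by_cases hik : i = k
          · exact Or.inr ⟨by rw [hik, Nat.sub_self] at h3; exact h3, Or.inr hik⟩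
          · refine Or.inl ?_
            rw [pvHit_iff]
            exact Or.inl ⟨by omega, by simp at h2 ⊢; omega, by rw [← hshift i (by omega)]; exact h3⟩
        · by_cases hik : i + 1 = k
          · exact Or.inr ⟨by rw [hik, Nat.sub_self] at h3; exact h3, Or.inl hik⟩
          · refine Or.inl ?_
            rw [pvHit_iff]
            exact Or.inr ⟨by omega, by simp at h2 ⊢; omega, by rw [← hshift (i+1) (by omega)]; exact h3⟩
      split_ifs with g1 g2
      · rfl
      · rfl
      · rcases key with h | h
        · exact absurd h g1
        · exact absurd h g2
    · rw [if_neg hc]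
      rw [pvHit_iff] at hc
      push Not at hc
      obtain ⟨hcl, hcr⟩ := hc
      rw [if_neg (by
        rw [pvHit_iff]
        rintro (⟨h1, h2, h3⟩ | ⟨h1, h2, h3⟩)
        · exact (hcl (by omega) (by simp at h2 ⊢; omega)) (by rwa [hshift i (by omega)])
        · exact (hcr (by omega) (by simp at h2 ⊢; omega)) (by rwa [hshift (i+1) (by omega)]))]
      rw [if_neg (by
        rintro ⟨hes, h | h⟩
        · exact (hcr (by omega) (by simp; omega)) (by rw [show i + 1 - k = 0 from by omega]; exact hes)
        · exact (hcl (by omega) (by simp; omega)) (by rw [show i - k = 0 from by omega]; exact hes))]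

-- the marked array equals pvSeps of the slot list
theorem pvScatter_eq_pvSeps (l : List String) :
    (PySem.List.enumerate l).foldl pvStep (List.replicate (l.length - 1) "+")
      = pvSeps l := by
  obtain ⟨hlen, hval⟩ := pvScatter l 0 (List.replicate (l.length - 1) "+")
  simp only [Nat.cast_zero] at hlen hval
  apply List.ext_getElem
  · rw [hlen, List.length_replicate, pvSeps_length]
  · intro i h1 h2
    have hi : i < l.length - 1 := by rwa [pvSeps_length] at h2
    have hi' : i < (List.replicate (l.length - 1) "+").length := by simpa using hi
    have hv := hval i hi'
    have hhit : pvHit l 0 i = (is_empty (l.getD i "") || is_empty (l.getD (i+1) "")) := by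
      simp only [pvHit, Nat.zero_le, Nat.sub_zero, decide_true, Bool.true_and]
      have b1 : decide (i < l.length) = true := by simp; omega
      have b2 : decide (i + 1 < l.length) = true := by simp; omega
      rw [b1, b2]
      simp
    have hrep : (List.replicate (l.length - 1) "+").getD i "" = "+" := by
      rw [List.getD_eq_getElem?_getD, List.getElem?_replicate_of_lt hi]
      rfl
    rw [← List.getD_eq_getElem _ _ (hn := h1), ← List.getD_eq_getElem _ _ (hn := h2),
        hv, hhit, hrep, pvSeps_getD l i (by omega)]

-- B's interleaving fold over zip (pvSeps (p :: rest)) rest produces pvChain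
theorem pvB_interleave (rest : List String) : ∀ (p : String) (acc : List String),
    (List.zip (pvSeps (p :: rest)) rest).foldl
      (fun parts q => (parts ++ [q.1]) ++ [q.2]) acc = acc ++ pvChain p rest := by
  induction rest with
  | nil => intro p acc; simp [pvSeps, pvChain]
  | cons s r ih =>
    intro p acc
    show (List.zip ((if is_empty p || is_empty s then "-" else "+") :: pvSeps (s :: r)) (s :: r)).foldl _ acc = _
    rw [List.zip_cons_cons, List.foldl_cons, ih s]
    simp only [pvChain, List.append_assoc, List.cons_append, List.nil_append]

-- ===== VERDICT (by name: the statement is the Claim_ definition above) =====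
theorem join_slots_spec : Claim_equal_join_slots := by
  intro slotlist almsep _ hpre
  unfold Spec_join_slots join_slots join_slots_alt
  cases slotlist with
  | nil => exact absurd rfl hpre
  | cons x rest =>
    simp only [PySem.List.slice_from_one, List.tail_cons]
    have h0 : PySem.List.pyGet? (x :: rest) (0 : Int) = some x := by
      simp [PySem.List.pyGet?, PySem.List.pyIdx?]
    rw [h0]
    have hA := pvA_loop rest [] x
    simp only [List.nil_append] at hA
    rw [Option.getD_some, hA]
    have hstep : (fun (seps : List String) (p : Int × String) =>
        if is_empty p.2 then
          let seps := if 0 < p.1 then seps.set (p.1 - 1).toNat "-" else seps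
          if p.1 < (seps.length : Int) then seps.set p.1.toNat "-" else seps
        else seps) = pvStep := rfl
    rw [hstep]
    have hsc := pvScatter_eq_pvSeps (x :: rest)
    simp only [List.length_cons, Nat.add_sub_cancel] at hsc
    rw [show ((x :: rest).length - 1) = rest.length from by simp, hsc, pvB_interleave rest x [x]]
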